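-- pv_equiv track=rewrite | github.com/arianasut0526/ariana | rezolutie.py | rezolutie
-- ===== SOURCE A (Python) =====
-- def rezolva_clauze(C1, C2):
--     resolvents = set()
--     for l in C1:
--         if -l in C2:
--             new_clause = (C1 | C2) - {l, -l}
--             resolvents.add(frozenset(new_clause))
--     return resolvents
--
-- def rezolutie(formula):
--     clauze = [set(cl) for cl in formula]
--     new = set()
--     while True:
--         n = len(clauze)
--         for i in range(n):
--             for j in range(i + 1, n):
--                 resolvents = rezolva_clauze(clauze[i], clauze[j])
--                 if frozenset() in resolvents:
--                     return False
--                 new |= resolvents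
--         if new.issubset(set(map(frozenset, clauze))):
--             return True
--         for cl in new:
--             if cl not in clauze:
--                 clauze.append(set(cl))
-- ===== SOURCE B (Python) =====
-- def rezolutie(formula):
--     # Given-clause incremental resolution: each unordered pair of clause
--     # positions is resolved exactly once, instead of re-resolving all pairs
--     # every round as A does.
--     clauze = [set(cl) for cl in formula]
--     seen = set(map(frozenset, clauze))
--     j = 0
--     while j < len(clauze):
--         cj = clauze[j]
--         for i in range(j):
--             ci = clauze[i]
--             for l in ci:
--                 if -l in cj:
--                     r = frozenset((ci | cj) - {l, -l})
--                     if not r: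
--                         return False
--                     if r not in seen:
--                         seen.add(r)
--                         clauze.append(set(r))
--         j += 1
--     return True
-- ===== Notes on version B (the rewrite author's own statement) =====
-- stated objective: faster
-- what changed: Replaces A's round-based saturation (re-resolving every pair of the whole clause list each round, with a global 'new' set and an issubset fixpoint test) by an incremental given-clause loop that resolves each unordered pair of clause positions exactly once against a growing list, using a 'seen' set to append each resolvent at most once.
import Mathlib
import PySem

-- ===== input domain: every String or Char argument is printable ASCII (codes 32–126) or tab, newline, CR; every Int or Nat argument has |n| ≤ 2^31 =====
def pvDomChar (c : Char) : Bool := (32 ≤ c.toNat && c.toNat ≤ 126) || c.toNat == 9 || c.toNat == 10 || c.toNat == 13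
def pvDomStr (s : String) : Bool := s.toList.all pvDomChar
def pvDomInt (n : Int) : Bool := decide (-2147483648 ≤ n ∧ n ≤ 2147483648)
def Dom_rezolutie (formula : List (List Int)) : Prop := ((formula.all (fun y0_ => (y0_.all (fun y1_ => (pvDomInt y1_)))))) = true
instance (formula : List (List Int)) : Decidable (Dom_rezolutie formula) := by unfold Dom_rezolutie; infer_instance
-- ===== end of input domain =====

-- B replaces A's round-based saturation (re-resolving every pair of the clause list each
-- round until a fixpoint) by an incremental given-clause loop that resolves each unordered
-- pair of clause positions exactly once (objective: faster).
-- Python sets/frozensets of literals are modelled as strictly-sorted duplicate-free lists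
-- (pvCanon), so Python's set equality becomes list equality; the Bool result does not
-- depend on any set iteration order.

-- ===== PORT A =====
-- frozenset of a list of literals, canonically represented
def pvCanon (cl : List Int) : List Int :=
  PySem.List.sorted (PySem.Set.ofList cl) (fun x => x) false

-- frozenset((C1 | C2) - {l, -l})  (both Pythons contain this very expression)
def pvResolve1 (c1 c2 : List Int) (l : Int) : List Int :=
  pvCanon ((c1 ++ c2).filter (fun x => !(x == l) && !(x == -l)))

-- rezolva_clauze(C1, C2)
def rezolvaClauze (c1 c2 : List Int) : PySem.Set (List Int) :=
  c1.foldl (fun resolvents l =>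
    if (-l) ∈ c2 then PySem.Set.add resolvents (pvResolve1 c1 c2 l) else resolvents)
    PySem.Set.empty

-- the pairs (clauze[i], clauze[j]) for i < j, in A's scan order
def pvPairs : List (List Int) → List (List Int × List Int)
  | [] => []
  | c :: rest => rest.map (fun d => (c, d)) ++ pvPairs rest

-- the double loop over pairs: none = 'return False' (empty resolvent), some new = updated 'new'
def pvScanA : List (List Int × List Int) → PySem.Set (List Int) → Option (PySem.Set (List Int))
  | [], new => some new
  | (c1, c2) :: rest, new =>
    let resolvents := rezolvaClauze c1 c2
    if ([] : List Int) ∈ resolvents then none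
    else pvScanA rest (PySem.Set.update new resolvents)

-- for cl in new: if cl not in clauze: clauze.append(set(cl))
def pvAppendNew (clauze : List (List Int)) (new : PySem.Set (List Int)) : List (List Int) :=
  new.foldl (fun cz cl => if cl ∈ cz then cz else cz ++ [cl]) clauze

-- the 'while True' loop; the fuel passed in by rezolutie is proved sufficient below
-- (pvLoopA_spec), so the fuel-0 branch is never reached there
def pvLoopA : Nat → List (List Int) → PySem.Set (List Int) → Bool
  | 0, _, _ => true
  | fuel + 1, clauze, new =>
    match pvScanA (pvPairs clauze) new with
    | none => false
    | some new' =>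
      if PySem.Set.issubset new' (PySem.Set.ofList clauze) then true
      else pvLoopA fuel (pvAppendNew clauze new') new'

def rezolutie (formula : List (List Int)) : Bool :=
  pvLoopA (2 ^ formula.flatten.length + 1) (formula.map pvCanon) PySem.Set.empty

-- ===== PORT B =====
-- one iteration of Source B's literal loop; none = 'return False'
def pvStepB (ci cj : List Int) (ost : Option (List (List Int) × PySem.Set (List Int)))
    (l : Int) : Option (List (List Int) × PySem.Set (List Int)) :=
  ost.bind (fun st =>
    if (-l) ∈ cj then
      let r := pvResolve1 ci cj l
      if r = [] then none
      else if r ∈ st.2 then some st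
      else some (st.1 ++ [r], PySem.Set.add st.2 r)
    else some st)

-- for l in ci: ...  (inner literal loop of Source B)
def pvInnerB (ci cj : List Int) (st : List (List Int) × PySem.Set (List Int)) :
    Option (List (List Int) × PySem.Set (List Int)) :=
  ci.foldl (pvStepB ci cj) (some st)

-- for i in range(j): ...  (middle loop of Source B over the clauses before position j)
def pvMidB (cj : List Int) (pre : List (List Int))
    (st : List (List Int) × PySem.Set (List Int)) :
    Option (List (List Int) × PySem.Set (List Int)) :=
  pre.foldl (fun ost ci => ost.bind (pvInnerB ci cj)) (some st)

-- while j < len(clauze); the fuel passed in by rezolutie_alt is proved sufficient below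
-- (pvLoopB_spec), so the fuel-0 branch is never reached there
def pvLoopB : Nat → List (List Int) → PySem.Set (List Int) → Nat → Bool
  | 0, _, _, _ => true
  | fuel + 1, clauze, seen, j =>
    if h : j < clauze.length then
      match pvMidB clauze[j] (clauze.take j) (clauze, seen) with
      | none => false
      | some (cz', seen') => pvLoopB fuel cz' seen' (j + 1)
    else true

def rezolutie_alt (formula : List (List Int)) : Bool :=
  let clauze := formula.map pvCanon
  pvLoopB (clauze.length + 2 ^ formula.flatten.length + 1) clauze (PySem.Set.ofList clauze) 0

-- ===== PRECONDITION & SPEC =====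
def Spec_rezolutie (formula : List (List Int)) (out : Bool) : Prop := out = rezolutie_alt formula
instance (formula : List (List Int)) (out : Bool) : Decidable (Spec_rezolutie formula out) := by unfold Spec_rezolutie; infer_instance

-- ===== CLAIM (what is proved, stated in full; the proofs are below) =====
def Claim_equal_rezolutie : Prop := ∀ (formula : List (List Int)), Dom_rezolutie formula → Spec_rezolutie formula (rezolutie formula)

-- ===== LEMMAS AND PROOFS =====

-- a canonical clause: strictly sorted (hence duplicate-free)
def pvCanonP (c : List Int) : Prop := List.Pairwise (· < ·) c

-- canonical clause over the literal universe U
def pvOkc (U : List Int) (c : List Int) : Prop := pvCanonP c ∧ ∀ x ∈ c, x ∈ U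

-- clauses derivable from the initial clause list S by the programs' resolution rule
-- (two clause-list positions resolve; equal clauses only when S itself holds two copies)
inductive pvDer (S : List (List Int)) : List Int → Prop where
  | base {c} : c ∈ S → pvDer S c
  | step {c1 c2 r} : pvDer S c1 → pvDer S c2 → (c1 ≠ c2 ∨ 2 ≤ S.count c1) →
      r ∈ rezolvaClauze c1 c2 → pvDer S r

-- both programs return false exactly when some derivable allowed pair has the empty resolvent
def pvBad (S : List (List Int)) : Prop :=
  ∃ c1 c2, pvDer S c1 ∧ pvDer S c2 ∧ (c1 ≠ c2 ∨ 2 ≤ S.count c1) ∧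
    ([] : List Int) ∈ rezolvaClauze c1 c2

-- number of subsets of the literal universe not yet present in clauze (fuel measure)
def pvM (U : List Int) (clauze : List (List Int)) : Nat :=
  (U.toFinset.powerset.filter (fun s => ¬ ∃ c ∈ clauze, c.toFinset = s)).card

-- invariant of A's loop
def pvGoodA (U : List Int) (S clauze : List (List Int)) (new : PySem.Set (List Int)) : Prop :=
  (∀ c ∈ clauze, pvOkc U c) ∧ (∀ c ∈ new, pvOkc U c) ∧ new.Nodup ∧
  S <+: clauze ∧ (∀ c ∈ clauze, pvDer S c) ∧ (∀ c ∈ new, pvDer S c) ∧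
  (∀ c, 2 ≤ clauze.count c → 2 ≤ S.count c)

-- invariant of B's loop
def pvGoodB (U : List Int) (S clauze : List (List Int)) (seen : PySem.Set (List Int))
    (j : Nat) : Prop :=
  (∀ c ∈ clauze, pvOkc U c) ∧ (∀ y, y ∈ seen ↔ y ∈ clauze) ∧
  S <+: clauze ∧ (∀ c ∈ clauze, pvDer S c) ∧
  (∀ c, 2 ≤ clauze.count c → 2 ≤ S.count c) ∧
  j ≤ clauze.length ∧
  (∀ p ∈ pvPairs (clauze.take j), (([] : List Int) ∉ rezolvaClauze p.1 p.2) ∧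
    ∀ r ∈ rezolvaClauze p.1 p.2, r ∈ clauze)

theorem pvCanonP_nodup {c : List Int} (h : pvCanonP c) : c.Nodup :=
  h.imp (fun hlt => ne_of_lt hlt)

theorem pvCanon_mem (cl : List Int) (x : Int) : x ∈ pvCanon cl ↔ x ∈ cl := by
  unfold pvCanon
  rw [(PySem.List.sorted_perm (PySem.Set.ofList cl) (fun x => x) false).mem_iff,
    PySem.Set.mem_ofList]

theorem pvCanonP_pvCanon (cl : List Int) : pvCanonP (pvCanon cl) := by
  have hle := PySem.List.sorted_pairwise (PySem.Set.ofList cl) (fun x => x)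
  have hnd : (pvCanon cl).Nodup :=
    ((PySem.List.sorted_perm (PySem.Set.ofList cl) (fun x => x) false).nodup_iff).mpr
      (PySem.Set.nodup_ofList cl)
  exact (hle.and hnd).imp (fun h => lt_of_le_of_ne h.1 h.2)

theorem pvCanon_eq_of_canonP {c cl : List Int} (hc : pvCanonP c)
    (h : ∀ x, x ∈ cl ↔ x ∈ c) : pvCanon cl = c := by
  unfold pvCanon
  refine PySem.List.sorted_eq_of_perm_of_pairwise_lt _ _ _ ?_ hc
  rw [List.perm_ext_iff_of_nodup (pvCanonP_nodup hc) (PySem.Set.nodup_ofList cl)]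
  intro a
  rw [PySem.Set.mem_ofList]
  exact (h a).symm

theorem pvCanon_congr {xs ys : List Int} (h : ∀ x, x ∈ xs ↔ x ∈ ys) :
    pvCanon xs = pvCanon ys :=
  pvCanon_eq_of_canonP (pvCanonP_pvCanon ys) (fun x => (h x).trans (pvCanon_mem ys x).symm)

theorem pvCanonP_inj {c1 c2 : List Int} (h1 : pvCanonP c1) (h2 : pvCanonP c2)
    (h : c1.toFinset = c2.toFinset) : c1 = c2 := by
  have e1 : pvCanon c1 = c1 := pvCanon_eq_of_canonP h1 (fun _ => Iff.rfl)
  have e2 : pvCanon c1 = c2 := pvCanon_eq_of_canonP h2 (fun x => by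
    rw [← List.mem_toFinset, h, List.mem_toFinset])
  rw [← e1, e2]

theorem mem_rezolva {c1 c2 r : List Int} :
    r ∈ rezolvaClauze c1 c2 ↔ ∃ l ∈ c1, (-l) ∈ c2 ∧ r = pvResolve1 c1 c2 l := by
  unfold rezolvaClauze
  rw [PySem.List.foldl_ite_eq_foldl_filter (p := fun l => (-l) ∈ c2)
    (f := fun acc l => PySem.Set.add acc (pvResolve1 c1 c2 l)),
    ← PySem.Set.update_map_eq_foldl_add]
  simp only [PySem.Set.mem_update, List.mem_map, List.mem_filter, decide_eq_true_eq]
  constructor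
  · rintro (hc | ⟨l, ⟨hl, hneg⟩, rfl⟩)
    · cases hc
    · exact ⟨l, hl, hneg, rfl⟩
  · rintro ⟨l, hl, hneg, rfl⟩
    exact Or.inr ⟨l, ⟨hl, hneg⟩, rfl⟩

theorem rezolva_symm {c1 c2 r : List Int} (h : r ∈ rezolvaClauze c1 c2) :
    r ∈ rezolvaClauze c2 c1 := by
  rw [mem_rezolva] at h ⊢
  obtain ⟨l, hl, hneg, rfl⟩ := h
  refine ⟨-l, hneg, by simpa using hl, ?_⟩
  unfold pvResolve1
  apply pvCanon_congr
  intro x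
  simp only [List.mem_filter, List.mem_append, Bool.and_eq_true, Bool.not_eq_true',
    beq_eq_false_iff_ne, ne_eq, neg_neg]
  tauto

theorem rezolva_okc {U c1 c2 r : List Int} (h1 : pvOkc U c1) (h2 : pvOkc U c2)
    (h : r ∈ rezolvaClauze c1 c2) : pvOkc U r := by
  rw [mem_rezolva] at h
  obtain ⟨l, _, _, rfl⟩ := h
  refine ⟨pvCanonP_pvCanon _, ?_⟩
  intro x hx
  rw [pvResolve1, pvCanon_mem] at hx
  rcases (List.mem_append.mp (List.mem_filter.mp hx).1) with hx | hx
  · exact h1.2 x hx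
  · exact h2.2 x hx

theorem mem_pvPairs {l : List (List Int)} {p : List Int × List Int} (h : p ∈ pvPairs l) :
    p.1 ∈ l ∧ p.2 ∈ l ∧ (p.1 = p.2 → 2 ≤ l.count p.1) := by
  induction l with
  | nil => cases h
  | cons c rest ih =>
    simp only [pvPairs, List.mem_append, List.mem_map] at h
    rcases h with ⟨d, hd, rfl⟩ | h
    · refine ⟨List.mem_cons_self, List.mem_cons_of_mem _ hd, ?_⟩
      intro he
      have he' : c = d := he
      subst he'
      have h1 : 1 ≤ rest.count c := List.count_pos_iff.mpr hd
      simp only [List.count_cons_self]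
      omega
    · obtain ⟨h1, h2, hc⟩ := ih h
      refine ⟨List.mem_cons_of_mem _ h1, List.mem_cons_of_mem _ h2, ?_⟩
      intro he
      have h3 := hc he
      have h4 : rest.count p.1 ≤ (c :: rest).count p.1 := by
        simp only [List.count_cons]; split <;> omega
      omega

theorem pvPairs_complete_ne {l : List (List Int)} {c1 c2 : List Int} (hne : c1 ≠ c2)
    (h1 : c1 ∈ l) (h2 : c2 ∈ l) : (c1, c2) ∈ pvPairs l ∨ (c2, c1) ∈ pvPairs l := by
  induction l with
  | nil => cases h1
  | cons x rest ih =>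
    simp only [pvPairs, List.mem_append, List.mem_map]
    rcases List.mem_cons.mp h1 with rfl | h1'
    · have h2' : c2 ∈ rest := by
        rcases List.mem_cons.mp h2 with rfl | h2'
        · exact absurd rfl hne
        · exact h2'
      exact Or.inl (Or.inl ⟨c2, h2', rfl⟩)
    · rcases List.mem_cons.mp h2 with rfl | h2'
      · exact Or.inr (Or.inl ⟨c1, h1', rfl⟩)
      · rcases ih h1' h2' with h | h
        · exact Or.inl (Or.inr h)
        · exact Or.inr (Or.inr h)

theorem pvPairs_complete_dup {l : List (List Int)} {c : List Int} (h : 2 ≤ l.count c) :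
    (c, c) ∈ pvPairs l := by
  induction l with
  | nil => simp at h
  | cons x rest ih =>
    simp only [pvPairs, List.mem_append, List.mem_map]
    by_cases hx : x = c
    · subst hx
      have h1 : 1 ≤ rest.count x := by
        simp only [List.count_cons_self] at h; omega
      exact Or.inl ⟨x, List.count_pos_iff.mp h1, rfl⟩
    · have h1 : 2 ≤ rest.count c := by
        simp only [List.count_cons] at h
        split at h <;> simp_all
      exact Or.inr (ih h1)

theorem mem_pvPairs_append_singleton {l : List (List Int)} {x : List Int}
    {p : List Int × List Int} :
    p ∈ pvPairs (l ++ [x]) ↔ p ∈ pvPairs l ∨ ∃ a ∈ l, p = (a, x) := by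
  induction l with
  | nil => simp [pvPairs]
  | cons c rest ih =>
    simp only [List.cons_append, pvPairs, List.mem_append, List.mem_map, ih, List.mem_cons]
    aesop

theorem pvScanA_none {ps : List (List Int × List Int)} :
    ∀ {new : PySem.Set (List Int)}, pvScanA ps new = none →
    ∃ p ∈ ps, ([] : List Int) ∈ rezolvaClauze p.1 p.2 := by
  induction ps with
  | nil => intro new h; simp [pvScanA] at h
  | cons p rest ih =>
    intro new h
    obtain ⟨c1, c2⟩ := p
    simp only [pvScanA] at h
    split at h
    · exact ⟨(c1, c2), List.mem_cons_self, by assumption⟩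
    · obtain ⟨q, hq, hr⟩ := ih h
      exact ⟨q, List.mem_cons_of_mem _ hq, hr⟩

theorem pvScanA_some {ps : List (List Int × List Int)} :
    ∀ {new new' : PySem.Set (List Int)}, pvScanA ps new = some new' →
    (∀ y ∈ new, y ∈ new') ∧
    (∀ y ∈ new', y ∈ new ∨ ∃ p ∈ ps, y ∈ rezolvaClauze p.1 p.2) ∧
    (∀ p ∈ ps, (([] : List Int) ∉ rezolvaClauze p.1 p.2) ∧
      ∀ r ∈ rezolvaClauze p.1 p.2, r ∈ new') ∧
    (new.Nodup → new'.Nodup) := by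
  induction ps with
  | nil =>
    intro new new' h
    simp only [pvScanA, Option.some.injEq] at h
    subst h
    exact ⟨fun y hy => hy, fun y hy => Or.inl hy, by simp, fun h => h⟩
  | cons p rest ih =>
    intro new new' h
    obtain ⟨c1, c2⟩ := p
    simp only [pvScanA] at h
    split at h
    · cases h
    · rename_i hnotmem
      obtain ⟨ha, hb, hc, hd⟩ := ih h
      refine ⟨?_, ?_, ?_, ?_⟩
      · intro y hy
        exact ha y ((PySem.Set.mem_update _ _ _).mpr (Or.inl hy))
      · intro y hy
        rcases hb y hy with hy' | ⟨q, hq, hr⟩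
        · rcases (PySem.Set.mem_update _ _ _).mp hy' with hy'' | hy''
          · exact Or.inl hy''
          · exact Or.inr ⟨(c1, c2), List.mem_cons_self, hy''⟩
        · exact Or.inr ⟨q, List.mem_cons_of_mem _ hq, hr⟩
      · intro q hq
        rcases List.mem_cons.mp hq with rfl | hq'
        · exact ⟨hnotmem, fun r hr => ha r ((PySem.Set.mem_update _ _ _).mpr (Or.inr hr))⟩
        · exact hc q hq'
      · intro hnd
        exact hd (PySem.Set.nodup_update _ _ hnd)

theorem saturated_not_bad {S F : List (List Int)} (hpre : S <+: F)
    (hok : ∀ p ∈ pvPairs F, (([] : List Int) ∉ rezolvaClauze p.1 p.2) ∧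
      ∀ r ∈ rezolvaClauze p.1 p.2, r ∈ F) : ¬ pvBad S := by
  have hder : ∀ c, pvDer S c → c ∈ F := by
    intro c h
    induction h with
    | base hc => exact hpre.sublist.subset hc
    | @step c1 c2 r h1 h2 hallow hr ih1 ih2 =>
      by_cases he : c1 = c2
      · subst he
        have hcnt : 2 ≤ S.count c1 := by
          rcases hallow with he' | hcnt
          · exact absurd rfl he'
          · exact hcnt
        have hcntF : 2 ≤ F.count c1 := le_trans hcnt (hpre.sublist.count_le c1)
        exact (hok _ (pvPairs_complete_dup hcntF)).2 r hr
      · rcases pvPairs_complete_ne he ih1 ih2 with hp | hp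
        · exact (hok _ hp).2 r hr
        · exact (hok _ hp).2 r (rezolva_symm hr)
  rintro ⟨c1, c2, h1, h2, hallow, hres⟩
  by_cases he : c1 = c2
  · subst he
    have hcnt : 2 ≤ S.count c1 := by
      rcases hallow with he' | hcnt
      · exact absurd rfl he'
      · exact hcnt
    have hcntF : 2 ≤ F.count c1 := le_trans hcnt (hpre.sublist.count_le c1)
    exact (hok _ (pvPairs_complete_dup hcntF)).1 hres
  · rcases pvPairs_complete_ne he (hder _ h1) (hder _ h2) with hp | hp
    · exact (hok _ hp).1 hres
    · exact (hok _ hp).1 (rezolva_symm hres)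

theorem pvAppendNew_eq {new : PySem.Set (List Int)} (hnd : new.Nodup) :
    ∀ clauze, pvAppendNew clauze new = clauze ++ new.filter (fun c => decide (c ∉ clauze)) := by
  induction new with
  | nil => intro clauze; simp [pvAppendNew]
  | cons x rest ih =>
    intro clauze
    have hx : x ∉ rest := (List.nodup_cons.mp hnd).1
    have ihr := ih (List.Nodup.of_cons hnd)
    show List.foldl _ (if x ∈ clauze then clauze else clauze ++ [x]) rest = _
    by_cases hmem : x ∈ clauze
    · rw [if_pos hmem]
      rw [show List.foldl (fun cz cl => if cl ∈ cz then cz else cz ++ [cl]) clauze rest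
          = pvAppendNew clauze rest from rfl, ihr]
      simp [hmem]
    · rw [if_neg hmem]
      rw [show List.foldl (fun cz cl => if cl ∈ cz then cz else cz ++ [cl]) (clauze ++ [x]) rest
          = pvAppendNew (clauze ++ [x]) rest from rfl, ihr]
      have hfil : rest.filter (fun c => decide (c ∉ clauze ++ [x]))
          = rest.filter (fun c => decide (c ∉ clauze)) := by
        apply List.filter_congr
        intro c hc
        have : c ≠ x := fun he => hx (he ▸ hc)
        simp [List.mem_append, this]
      rw [hfil]
      simp [hmem, List.append_assoc]

theorem pvM_snoc_lt {U : List Int} {clauze : List (List Int)} {a : List Int}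
    (hcz : ∀ c ∈ clauze, pvCanonP c) (ha : pvOkc U a) (hnot : a ∉ clauze) :
    pvM U (clauze ++ [a]) + 1 ≤ pvM U clauze := by
  unfold pvM
  have hsub : (U.toFinset.powerset.filter (fun s => ¬ ∃ c ∈ clauze ++ [a], c.toFinset = s))
      ⊆ (U.toFinset.powerset.filter (fun s => ¬ ∃ c ∈ clauze, c.toFinset = s)) := by
    intro s hs
    rw [Finset.mem_filter] at hs ⊢
    refine ⟨hs.1, fun hex => hs.2 ?_⟩
    obtain ⟨c, hc, he⟩ := hex
    exact ⟨c, List.mem_append_left _ hc, he⟩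
  have hmem1 : a.toFinset ∈ (U.toFinset.powerset.filter (fun s => ¬ ∃ c ∈ clauze, c.toFinset = s)) := by
    rw [Finset.mem_filter, Finset.mem_powerset]
    constructor
    · intro x hx
      rw [List.mem_toFinset] at hx ⊢
      exact ha.2 x hx
    · rintro ⟨c, hc, he⟩
      exact hnot (pvCanonP_inj ha.1 (hcz c hc) he.symm ▸ hc)
  have hmem2 : a.toFinset ∉ (U.toFinset.powerset.filter (fun s => ¬ ∃ c ∈ clauze ++ [a], c.toFinset = s)) := by
    rw [Finset.mem_filter]
    rintro ⟨-, hs⟩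
    exact hs ⟨a, List.mem_append_right _ (List.mem_singleton_self a), rfl⟩
  have : (U.toFinset.powerset.filter (fun s => ¬ ∃ c ∈ clauze ++ [a], c.toFinset = s))
      ⊂ (U.toFinset.powerset.filter (fun s => ¬ ∃ c ∈ clauze, c.toFinset = s)) :=
    (Finset.ssubset_iff_of_subset hsub).mpr ⟨a.toFinset, hmem1, hmem2⟩
  have := Finset.card_lt_card this
  omega

theorem pvM_append_le {U : List Int} {t : List (List Int)} (hnd : t.Nodup) :
    ∀ {clauze}, (∀ c ∈ clauze, pvCanonP c) → (∀ c ∈ t, pvOkc U c ∧ c ∉ clauze) →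
    pvM U (clauze ++ t) + t.length ≤ pvM U clauze := by
  induction t with
  | nil => intro clauze _ _; simp
  | cons a rest ih =>
    intro clauze hcz ht
    have ha := ht a List.mem_cons_self
    have h1 : pvM U (clauze ++ [a]) + 1 ≤ pvM U clauze := pvM_snoc_lt hcz ha.1 ha.2
    have h2 : pvM U ((clauze ++ [a]) ++ rest) + rest.length ≤ pvM U (clauze ++ [a]) := by
      apply ih (List.Nodup.of_cons hnd)
      · intro c hc
        rcases List.mem_append.mp hc with hc | hc
        · exact hcz c hc
        · simp only [List.mem_singleton] at hc; subst hc; exact ha.1.1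
      · intro c hc
        have hca : c ≠ a := fun he => (List.nodup_cons.mp hnd).1 (he ▸ hc)
        refine ⟨(ht c (List.mem_cons_of_mem _ hc)).1, ?_⟩
        simp only [List.mem_append, List.mem_singleton]
        rintro (hmem | hmem)
        · exact (ht c (List.mem_cons_of_mem _ hc)).2 hmem
        · exact hca hmem
    have he : (clauze ++ [a]) ++ rest = clauze ++ a :: rest := by simp
    rw [he] at h2
    simp only [List.length_cons]
    omega

-- a pair scanned from clauze is an allowed pair of derivable clauses
theorem pair_allowed {U : List Int} {S clauze : List (List Int)} {new : PySem.Set (List Int)}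
    (hg : pvGoodA U S clauze new) {p : List Int × List Int} (hp : p ∈ pvPairs clauze) :
    pvDer S p.1 ∧ pvDer S p.2 ∧ (p.1 ≠ p.2 ∨ 2 ≤ S.count p.1) := by
  obtain ⟨h1, h2, hcnt⟩ := mem_pvPairs hp
  refine ⟨hg.2.2.2.2.1 _ h1, hg.2.2.2.2.1 _ h2, ?_⟩
  by_cases he : p.1 = p.2
  · exact Or.inr (hg.2.2.2.2.2.2 _ (hcnt he))
  · exact Or.inl he

theorem pvLoopA_spec {U : List Int} {S : List (List Int)} :
    ∀ fuel clauze new, pvM U clauze < fuel → pvGoodA U S clauze new →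
      (pvLoopA fuel clauze new = false → pvBad S) ∧
      (pvLoopA fuel clauze new = true → ¬ pvBad S) := by
  intro fuel
  induction fuel with
  | zero => intro clauze new hf _; omega
  | succ fuel ih =>
    intro clauze new hf hg
    rw [pvLoopA]
    cases hscan : pvScanA (pvPairs clauze) new with
    | none =>
      refine ⟨fun _ => ?_, fun h => by simp at h⟩
      obtain ⟨p, hp, hres⟩ := pvScanA_none hscan
      obtain ⟨hd1, hd2, hal⟩ := pair_allowed hg hp
      exact ⟨p.1, p.2, hd1, hd2, hal, hres⟩
    | some new' =>
      dsimp only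
      obtain ⟨hmono, hfrom, hpairs, hnd⟩ := pvScanA_some hscan
      by_cases hsub : PySem.Set.issubset new' (PySem.Set.ofList clauze) = true
      · rw [if_pos hsub]
        refine ⟨fun h => by simp at h, fun _ => ?_⟩
        apply saturated_not_bad hg.2.2.2.1
        intro p hp
        refine ⟨(hpairs p hp).1, fun r hr => ?_⟩
        have := (PySem.Set.issubset_iff _ _).mp hsub r ((hpairs p hp).2 r hr)
        rwa [PySem.Set.mem_ofList] at this
      · rw [if_neg hsub]
        -- facts about new'
        have hnd' : new'.Nodup := hnd hg.2.2.1
        have hok' : ∀ c ∈ new', pvOkc U c := by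
          intro c hc
          rcases hfrom c hc with hc' | ⟨p, hp, hr⟩
          · exact hg.2.1 c hc'
          · obtain ⟨hp1, hp2, _⟩ := mem_pvPairs hp
            exact rezolva_okc (hg.1 _ hp1) (hg.1 _ hp2) hr
        have hder' : ∀ c ∈ new', pvDer S c := by
          intro c hc
          rcases hfrom c hc with hc' | ⟨p, hp, hr⟩
          · exact hg.2.2.2.2.2.1 c hc'
          · obtain ⟨hd1, hd2, hal⟩ := pair_allowed hg hp
            exact pvDer.step hd1 hd2 hal hr
        -- the appended tail
        set t := new'.filter (fun c => decide (c ∉ clauze)) with ht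
        have happ : pvAppendNew clauze new' = clauze ++ t := pvAppendNew_eq hnd' clauze
        have htsub : ∀ c ∈ t, c ∈ new' ∧ c ∉ clauze := by
          intro c hc
          have := List.mem_filter.mp hc
          exact ⟨this.1, by simpa using this.2⟩
        have htnd : t.Nodup := hnd'.filter _
        have htne : t ≠ [] := by
          intro hte
          apply hsub
          rw [PySem.Set.issubset_iff]
          intro y hy
          rw [PySem.Set.mem_ofList]
          by_contra hyc
          have : y ∈ t := List.mem_filter.mpr ⟨hy, by simpa using hyc⟩
          rw [hte] at this; cases this
        have htlen : 0 < t.length := List.length_pos_of_ne_nil htne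
        -- measure decreases
        have hm : pvM U (clauze ++ t) + t.length ≤ pvM U clauze := by
          apply pvM_append_le htnd
          · intro c hc; exact (hg.1 c hc).1
          · intro c hc
            obtain ⟨hc1, hc2⟩ := htsub c hc
            exact ⟨hok' c hc1, hc2⟩
        -- invariant preserved
        have hg' : pvGoodA U S (clauze ++ t) new' := by
          refine ⟨?_, hok', hnd', hg.2.2.2.1.trans (List.prefix_append _ _), ?_, hder', ?_⟩
          · intro c hc
            rcases List.mem_append.mp hc with hc | hc
            · exact hg.1 c hc
            · exact hok' c (htsub c hc).1
          · intro c hc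
            rcases List.mem_append.mp hc with hc | hc
            · exact hg.2.2.2.2.1 c hc
            · exact hder' c (htsub c hc).1
          · intro c hcnt
            apply hg.2.2.2.2.2.2
            rw [List.count_append] at hcnt
            by_cases hct : c ∈ t
            · have h0 : c ∉ clauze := (htsub c hct).2
              have : clauze.count c = 0 := List.count_eq_zero.mpr h0
              have : t.count c ≤ 1 := List.nodup_iff_count_le_one.mp htnd c
              omega
            · have : t.count c = 0 := List.count_eq_zero.mpr hct
              omega
        have := ih (clauze ++ t) new' (by omega) hg'
        rwa [happ]

theorem pvStepB_foldl_none (ci cj : List Int) (ls : List Int) :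
    ls.foldl (pvStepB ci cj) none = none := by
  induction ls with
  | nil => rfl
  | cons l ls ih => simpa [pvStepB] using ih

theorem pvBindB_foldl_none (cj : List Int) (pre : List (List Int)) :
    pre.foldl (fun ost ci => ost.bind (pvInnerB ci cj)) none = none := by
  induction pre with
  | nil => rfl
  | cons c pre ih => simpa using ih

theorem pvInnerGo_none {ci cj : List Int} : ∀ (ls : List Int)
    {cz : List (List Int)} {seen : PySem.Set (List Int)},
    ls.foldl (pvStepB ci cj) (some (cz, seen)) = none →
    ∃ l ∈ ls, (-l) ∈ cj ∧ pvResolve1 ci cj l = [] := by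
  intro ls
  induction ls with
  | nil => intro cz seen h; simp at h
  | cons l ls ih =>
    intro cz seen h
    rw [List.foldl_cons] at h
    by_cases hmem : (-l) ∈ cj
    · by_cases hr0 : pvResolve1 ci cj l = []
      · exact ⟨l, List.mem_cons_self, hmem, hr0⟩
      · by_cases hseen : pvResolve1 ci cj l ∈ seen
        · have hst : pvStepB ci cj (some (cz, seen)) l = some (cz, seen) := by
            simp [pvStepB, hmem, hr0, hseen]
          rw [hst] at h
          obtain ⟨l', hl', hm', he'⟩ := ih h
          exact ⟨l', List.mem_cons_of_mem _ hl', hm', he'⟩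
        · have hst : pvStepB ci cj (some (cz, seen)) l
              = some (cz ++ [pvResolve1 ci cj l], PySem.Set.add seen (pvResolve1 ci cj l)) := by
            simp [pvStepB, hmem, hr0, hseen]
          rw [hst] at h
          obtain ⟨l', hl', hm', he'⟩ := ih h
          exact ⟨l', List.mem_cons_of_mem _ hl', hm', he'⟩
    · have hst : pvStepB ci cj (some (cz, seen)) l = some (cz, seen) := by
        simp [pvStepB, hmem]
      rw [hst] at h
      obtain ⟨l', hl', hm', he'⟩ := ih h
      exact ⟨l', List.mem_cons_of_mem _ hl', hm', he'⟩

theorem pvInnerGo_some {ci cj : List Int} : ∀ (ls : List Int)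
    {cz cz' : List (List Int)} {seen seen' : PySem.Set (List Int)},
    ls.foldl (pvStepB ci cj) (some (cz, seen)) = some (cz', seen') →
    ∃ t, cz' = cz ++ t ∧ (∀ y, y ∈ seen' ↔ y ∈ seen ∨ y ∈ t) ∧ t.Nodup ∧
      (∀ c ∈ t, (∃ l ∈ ls, (-l) ∈ cj ∧ c = pvResolve1 ci cj l) ∧ c ∉ seen) ∧
      (∀ l ∈ ls, (-l) ∈ cj → (pvResolve1 ci cj l ≠ [] ∧ pvResolve1 ci cj l ∈ seen')) := by
  intro ls
  induction ls with
  | nil =>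
    intro cz cz' seen seen' h
    simp only [List.foldl_nil, Option.some.injEq, Prod.mk.injEq] at h
    exact ⟨[], by simp [h.1.symm], by simp [h.2.symm], List.nodup_nil, by simp, by simp⟩
  | cons l ls ih =>
    intro cz cz' seen seen' h
    rw [List.foldl_cons] at h
    by_cases hmem : (-l) ∈ cj
    · by_cases hr0 : pvResolve1 ci cj l = []
      · have hst : pvStepB ci cj (some (cz, seen)) l = none := by
          simp [pvStepB, hmem, hr0]
        rw [hst, pvStepB_foldl_none] at h
        cases h
      · by_cases hseen : pvResolve1 ci cj l ∈ seen
        · have hst : pvStepB ci cj (some (cz, seen)) l = some (cz, seen) := by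
            simp [pvStepB, hmem, hr0, hseen]
          rw [hst] at h
          obtain ⟨t, h1, h2, h3, h4, h5⟩ := ih h
          refine ⟨t, h1, h2, h3, ?_, ?_⟩
          · intro c hc
            obtain ⟨⟨l', hl', hm', he'⟩, hns⟩ := h4 c hc
            exact ⟨⟨l', List.mem_cons_of_mem _ hl', hm', he'⟩, hns⟩
          · intro l' hl' hm'
            rcases List.mem_cons.mp hl' with rfl | hl''
            · exact ⟨hr0, (h2 _).mpr (Or.inl hseen)⟩
            · exact h5 l' hl'' hm'
        · have hst : pvStepB ci cj (some (cz, seen)) l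
              = some (cz ++ [pvResolve1 ci cj l], PySem.Set.add seen (pvResolve1 ci cj l)) := by
            simp [pvStepB, hmem, hr0, hseen]
          rw [hst] at h
          obtain ⟨t, h1, h2, h3, h4, h5⟩ := ih h
          set r := pvResolve1 ci cj l with hrdef
          have hrt : r ∉ t := by
            intro hrt
            exact (h4 r hrt).2 ((PySem.Set.mem_add _ _ _).mpr (Or.inr rfl))
          refine ⟨r :: t, by simp [h1], ?_, List.nodup_cons.mpr ⟨hrt, h3⟩, ?_, ?_⟩
          · intro y
            rw [h2 y, PySem.Set.mem_add]
            simp only [List.mem_cons]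
            tauto
          · intro c hc
            rcases List.mem_cons.mp hc with rfl | hc'
            · exact ⟨⟨l, List.mem_cons_self, hmem, rfl⟩, hseen⟩
            · obtain ⟨⟨l', hl', hm', he'⟩, hns⟩ := h4 c hc'
              refine ⟨⟨l', List.mem_cons_of_mem _ hl', hm', he'⟩, ?_⟩
              intro hcs
              exact hns ((PySem.Set.mem_add _ _ _).mpr (Or.inl hcs))
          · intro l' hl' hm'
            rcases List.mem_cons.mp hl' with rfl | hl''
            · exact ⟨hr0, (h2 _).mpr (Or.inl ((PySem.Set.mem_add _ _ _).mpr (Or.inr rfl)))⟩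
            · exact h5 l' hl'' hm'
    · have hst : pvStepB ci cj (some (cz, seen)) l = some (cz, seen) := by
        simp [pvStepB, hmem]
      rw [hst] at h
      obtain ⟨t, h1, h2, h3, h4, h5⟩ := ih h
      refine ⟨t, h1, h2, h3, ?_, ?_⟩
      · intro c hc
        obtain ⟨⟨l', hl', hm', he'⟩, hns⟩ := h4 c hc
        exact ⟨⟨l', List.mem_cons_of_mem _ hl', hm', he'⟩, hns⟩
      · intro l' hl' hm'
        rcases List.mem_cons.mp hl' with rfl | hl''
        · exact absurd hm' hmem
        · exact h5 l' hl'' hm'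

theorem pvInnerB_none {ci cj : List Int} {cz : List (List Int)} {seen : PySem.Set (List Int)}
    (h : pvInnerB ci cj (cz, seen) = none) : ([] : List Int) ∈ rezolvaClauze ci cj := by
  obtain ⟨l, hl, hm, he⟩ := pvInnerGo_none ci h
  exact mem_rezolva.mpr ⟨l, hl, hm, he.symm⟩

theorem pvInnerB_some {ci cj : List Int} {cz cz' : List (List Int)}
    {seen seen' : PySem.Set (List Int)} (h : pvInnerB ci cj (cz, seen) = some (cz', seen')) :
    ∃ t, cz' = cz ++ t ∧ (∀ y, y ∈ seen' ↔ y ∈ seen ∨ y ∈ t) ∧ t.Nodup ∧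
      (∀ c ∈ t, c ∈ rezolvaClauze ci cj ∧ c ∉ seen) ∧
      (∀ r ∈ rezolvaClauze ci cj, r ∈ seen') ∧
      (([] : List Int) ∉ rezolvaClauze ci cj) := by
  obtain ⟨t, h1, h2, h3, h4, h5⟩ := pvInnerGo_some ci h
  refine ⟨t, h1, h2, h3, ?_, ?_, ?_⟩
  · intro c hc
    obtain ⟨⟨l, hl, hm, he⟩, hns⟩ := h4 c hc
    exact ⟨mem_rezolva.mpr ⟨l, hl, hm, he⟩, hns⟩
  · intro r hr
    obtain ⟨l, hl, hm, he⟩ := mem_rezolva.mp hr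
    exact he ▸ (h5 l hl hm).2
  · intro hr
    obtain ⟨l, hl, hm, he⟩ := mem_rezolva.mp hr
    exact (h5 l hl hm).1 he.symm

theorem pvMidB_none {cj : List Int} {pre : List (List Int)} :
    ∀ {cz : List (List Int)} {seen : PySem.Set (List Int)},
    pvMidB cj pre (cz, seen) = none →
    ∃ ci ∈ pre, ([] : List Int) ∈ rezolvaClauze ci cj := by
  induction pre with
  | nil => intro cz seen h; simp [pvMidB] at h
  | cons ci pre ih =>
    intro cz seen h
    rw [pvMidB, List.foldl_cons] at h
    cases hin : pvInnerB ci cj (cz, seen) with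
    | none => exact ⟨ci, List.mem_cons_self, pvInnerB_none hin⟩
    | some st1 =>
      obtain ⟨cz1, seen1⟩ := st1
      rw [show (some (cz, seen)).bind (pvInnerB ci cj) = pvInnerB ci cj (cz, seen) from rfl,
        hin] at h
      obtain ⟨ci', hci', hr⟩ := ih h
      exact ⟨ci', List.mem_cons_of_mem _ hci', hr⟩

theorem pvMidB_some {cj : List Int} {pre : List (List Int)} :
    ∀ {cz cz' : List (List Int)} {seen seen' : PySem.Set (List Int)},
    pvMidB cj pre (cz, seen) = some (cz', seen') →
    ∃ t, cz' = cz ++ t ∧ (∀ y, y ∈ seen' ↔ y ∈ seen ∨ y ∈ t) ∧ t.Nodup ∧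
      (∀ c ∈ t, (∃ ci ∈ pre, c ∈ rezolvaClauze ci cj) ∧ c ∉ seen) ∧
      (∀ ci ∈ pre, (([] : List Int) ∉ rezolvaClauze ci cj) ∧
        ∀ r ∈ rezolvaClauze ci cj, r ∈ seen') := by
  induction pre with
  | nil =>
    intro cz cz' seen seen' h
    simp only [pvMidB, List.foldl_nil, Option.some.injEq, Prod.mk.injEq] at h
    exact ⟨[], by simp [h.1.symm], by simp [h.2.symm], List.nodup_nil, by simp, by simp⟩
  | cons ci pre ih =>
    intro cz cz' seen seen' h
    rw [pvMidB, List.foldl_cons] at h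
    cases hin : pvInnerB ci cj (cz, seen) with
    | none =>
      rw [show (some (cz, seen)).bind (pvInnerB ci cj) = pvInnerB ci cj (cz, seen) from rfl,
        hin] at h
      rw [pvBindB_foldl_none] at h
      cases h
    | some st1 =>
      obtain ⟨cz1, seen1⟩ := st1
      rw [show (some (cz, seen)).bind (pvInnerB ci cj) = pvInnerB ci cj (cz, seen) from rfl,
        hin] at h
      obtain ⟨t1, g1, g2, g3, g4, g5, g6⟩ := pvInnerB_some hin
      obtain ⟨t2, k1, k2, k3, k4, k5⟩ := ih h
      have hmono1 : ∀ y, y ∈ seen1 → y ∈ seen' := fun y hy => (k2 y).mpr (Or.inl hy)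
      refine ⟨t1 ++ t2, ?_, ?_, ?_, ?_, ?_⟩
      · rw [k1, g1, List.append_assoc]
      · intro y
        rw [k2 y, g2 y, List.mem_append]
        tauto
      · rw [List.nodup_append]
        refine ⟨g3, k3, ?_⟩
        intro a ha b hb he
        subst he
        exact (k4 a hb).2 ((g2 a).mpr (Or.inr ha))
      · intro c hc
        rcases List.mem_append.mp hc with hc' | hc'
        · obtain ⟨hr, hns⟩ := g4 c hc'
          exact ⟨⟨ci, List.mem_cons_self, hr⟩, hns⟩
        · obtain ⟨⟨ci', hci', hr⟩, hns⟩ := k4 c hc'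
          refine ⟨⟨ci', List.mem_cons_of_mem _ hci', hr⟩, ?_⟩
          intro hcs
          exact hns ((g2 c).mpr (Or.inl hcs))
      · intro ci' hci'
        rcases List.mem_cons.mp hci' with rfl | hci''
        · exact ⟨g6, fun r hr => hmono1 r (g5 r hr)⟩
        · exact k5 ci' hci''

-- clauze[i] (i < j) and clauze[j] equal implies a duplicate in clauze
theorem dup_count {clauze : List (List Int)} {j : Nat} (hj : j < clauze.length)
    {c : List Int} (hc : c ∈ clauze.take j) (he : clauze[j] = c) :
    2 ≤ clauze.count c := by
  have hsplit : clauze = clauze.take j ++ clauze.drop j := (List.take_append_drop j clauze).symm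
  have hdrop : c ∈ clauze.drop j := by
    have : clauze[j] :: clauze.drop (j + 1) = clauze.drop j := List.getElem_cons_drop hj
    rw [← this, he]
    exact List.mem_cons_self
  have h1 : 1 ≤ (clauze.take j).count c := List.count_pos_iff.mpr hc
  have h2 : 1 ≤ (clauze.drop j).count c := List.count_pos_iff.mpr hdrop
  calc 2 ≤ (clauze.take j).count c + (clauze.drop j).count c := by omega
  _ = clauze.count c := by rw [← List.count_append, ← hsplit]

theorem pvLoopB_spec {U : List Int} {S : List (List Int)} :
    ∀ fuel clauze seen j, clauze.length - j + pvM U clauze < fuel →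
      pvGoodB U S clauze seen j →
      (pvLoopB fuel clauze seen j = false → pvBad S) ∧
      (pvLoopB fuel clauze seen j = true → ¬ pvBad S) := by
  intro fuel
  induction fuel with
  | zero => intro clauze seen j hf _; omega
  | succ fuel ih =>
    intro clauze seen j hf hg
    obtain ⟨hok, hseen, hpre, hder, hcnt, hjle, hdone⟩ := hg
    rw [pvLoopB]
    by_cases hj : j < clauze.length
    · rw [dif_pos hj]
      -- derivability/allowedness of the pair (ci, clauze[j])
      have hcj : clauze[j] ∈ clauze := List.getElem_mem hj
      have hallowed : ∀ ci ∈ clauze.take j,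
          pvDer S ci ∧ pvDer S clauze[j] ∧ (ci ≠ clauze[j] ∨ 2 ≤ S.count ci) := by
        intro ci hci
        refine ⟨hder ci (List.take_subset _ _ hci), hder _ hcj, ?_⟩
        by_cases he : ci = clauze[j]
        · exact Or.inr (hcnt ci (dup_count hj hci he.symm))
        · exact Or.inl he
      cases hmid : pvMidB clauze[j] (clauze.take j) (clauze, seen) with
      | none =>
        refine ⟨fun _ => ?_, fun h => by simp at h⟩
        obtain ⟨ci, hci, hres⟩ := pvMidB_none hmid
        obtain ⟨hd1, hd2, hal⟩ := hallowed ci hci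
        exact ⟨ci, clauze[j], hd1, hd2, hal, hres⟩
      | some st' =>
        obtain ⟨cz', seen'⟩ := st'
        dsimp only
        obtain ⟨t, k1, k2, k3, k4, k5⟩ := pvMidB_some hmid
        have htok : ∀ c ∈ t, pvOkc U c ∧ c ∉ clauze := by
          intro c hc
          obtain ⟨⟨ci, hci, hr⟩, hns⟩ := k4 c hc
          refine ⟨rezolva_okc (hok ci (List.take_subset _ _ hci)) (hok _ hcj) hr, ?_⟩
          intro hmem
          exact hns ((hseen c).mpr hmem)
        have hm : pvM U (clauze ++ t) + t.length ≤ pvM U clauze :=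
          pvM_append_le k3 (fun c hc => (hok c hc).1) htok
        have hg' : pvGoodB U S (clauze ++ t) seen' (j + 1) := by
          refine ⟨?_, ?_, hpre.trans (List.prefix_append _ _), ?_, ?_, ?_, ?_⟩
          · intro c hc
            rcases List.mem_append.mp hc with hc | hc
            · exact hok c hc
            · exact (htok c hc).1
          · intro y
            rw [k2 y, hseen y, List.mem_append]
          · intro c hc
            rcases List.mem_append.mp hc with hc | hc
            · exact hder c hc
            · obtain ⟨⟨ci, hci, hr⟩, _⟩ := k4 c hc
              obtain ⟨hd1, hd2, hal⟩ := hallowed ci hci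
              exact pvDer.step hd1 hd2 hal hr
          · intro c hc2
            apply hcnt
            rw [List.count_append] at hc2
            by_cases hct : c ∈ t
            · have h0 : clauze.count c = 0 := List.count_eq_zero.mpr (htok c hct).2
              have h1 : t.count c ≤ 1 := List.nodup_iff_count_le_one.mp k3 c
              omega
            · have : t.count c = 0 := List.count_eq_zero.mpr hct
              omega
          · rw [List.length_append]; omega
          · have htake : (clauze ++ t).take (j + 1) = clauze.take j ++ [clauze[j]] := by
              rw [List.take_append_of_le_length (by omega), List.take_add_one,
                List.getElem?_eq_getElem hj]
              rfl
            rw [htake]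
            intro p hp
            rcases mem_pvPairs_append_singleton.mp hp with hp' | ⟨a, ha, rfl⟩
            · obtain ⟨hn, hin⟩ := hdone p hp'
              exact ⟨hn, fun r hr => List.mem_append_left _ (hin r hr)⟩
            · obtain ⟨hn, hin⟩ := k5 a ha
              refine ⟨hn, fun r hr => ?_⟩
              have := (k2 r).mp (hin r hr)
              rcases this with hr' | hr'
              · exact List.mem_append_left _ ((hseen r).mp hr')
              · exact List.mem_append_right _ hr'
        have := ih (clauze ++ t) seen' (j + 1) (by
          rw [List.length_append]
          omega) hg'
        rwa [k1]
    · rw [dif_neg hj]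
      refine ⟨fun h => by simp at h, fun _ => ?_⟩
      apply saturated_not_bad hpre
      have : clauze.take j = clauze := List.take_of_length_le (by omega)
      rw [← this]
      intro p hp
      obtain ⟨hn, hin⟩ := hdone p hp
      exact ⟨hn, fun r hr => by rw [this]; exact hin r hr⟩


theorem pvM_le (U : List Int) (clauze : List (List Int)) : pvM U clauze ≤ 2 ^ U.length := by
  unfold pvM
  calc (Finset.filter _ _).card ≤ U.toFinset.powerset.card := Finset.card_filter_le _ _
  _ = 2 ^ U.toFinset.card := Finset.card_powerset _
  _ ≤ 2 ^ U.length := Nat.pow_le_pow_right (by norm_num) (List.toFinset_card_le U)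

theorem pv_init_okc (formula : List (List Int)) :
    ∀ c ∈ formula.map pvCanon, pvOkc formula.flatten c := by
  intro c hc
  obtain ⟨cl, hcl, rfl⟩ := List.mem_map.mp hc
  refine ⟨pvCanonP_pvCanon cl, fun x hx => ?_⟩
  rw [pvCanon_mem] at hx
  exact List.mem_flatten.mpr ⟨cl, hcl, hx⟩

theorem goodA_init (formula : List (List Int)) :
    pvGoodA formula.flatten (formula.map pvCanon) (formula.map pvCanon) PySem.Set.empty := by
  refine ⟨pv_init_okc formula, ?_, ?_, List.prefix_rfl, fun c hc => pvDer.base hc, ?_, ?_⟩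
  · intro c hc; cases hc
  · exact List.nodup_nil
  · intro c hc; cases hc
  · intro c h; exact h

theorem goodB_init (formula : List (List Int)) :
    pvGoodB formula.flatten (formula.map pvCanon) (formula.map pvCanon)
      (PySem.Set.ofList (formula.map pvCanon)) 0 := by
  refine ⟨pv_init_okc formula, fun y => PySem.Set.mem_ofList _ _, List.prefix_rfl,
    fun c hc => pvDer.base hc, fun c h => h, Nat.zero_le _, ?_⟩
  intro p hp
  rw [List.take_zero] at hp
  cases hp

-- ===== VERDICT (by name: the statement is the Claim_ definition above) =====
theorem rezolutie_spec : Claim_equal_rezolutie := by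
  intro formula _
  unfold Spec_rezolutie
  have hA := pvLoopA_spec (U := formula.flatten) (S := formula.map pvCanon)
      (2 ^ formula.flatten.length + 1) (formula.map pvCanon) PySem.Set.empty
      (by have := pvM_le formula.flatten (formula.map pvCanon); omega)
      (goodA_init formula)
  have hB := pvLoopB_spec (U := formula.flatten) (S := formula.map pvCanon)
      ((formula.map pvCanon).length + 2 ^ formula.flatten.length + 1)
      (formula.map pvCanon) (PySem.Set.ofList (formula.map pvCanon)) 0
      (by have := pvM_le formula.flatten (formula.map pvCanon); omega)
      (goodB_init formula)
  simp only [rezolutie, rezolutie_alt]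
  rcases Classical.em (pvBad (formula.map pvCanon)) with hbad | hbad
  · have ha : pvLoopA (2 ^ formula.flatten.length + 1) (formula.map pvCanon)
        PySem.Set.empty = false := by
      cases h : pvLoopA (2 ^ formula.flatten.length + 1) (formula.map pvCanon)
          PySem.Set.empty with
      | false => rfl
      | true => exact absurd hbad (hA.2 h)
    have hb : pvLoopB ((formula.map pvCanon).length + 2 ^ formula.flatten.length + 1)
        (formula.map pvCanon) (PySem.Set.ofList (formula.map pvCanon)) 0 = false := by
      cases h : pvLoopB ((formula.map pvCanon).length + 2 ^ formula.flatten.length + 1)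
          (formula.map pvCanon) (PySem.Set.ofList (formula.map pvCanon)) 0 with
      | false => rfl
      | true => exact absurd hbad (hB.2 h)
    rw [ha, hb]
  · have ha : pvLoopA (2 ^ formula.flatten.length + 1) (formula.map pvCanon)
        PySem.Set.empty = true := by
      cases h : pvLoopA (2 ^ formula.flatten.length + 1) (formula.map pvCanon)
          PySem.Set.empty with
      | true => rfl
      | false => exact absurd (hA.1 h) hbad
    have hb : pvLoopB ((formula.map pvCanon).length + 2 ^ formula.flatten.length + 1)
        (formula.map pvCanon) (PySem.Set.ofList (formula.map pvCanon)) 0 = true := by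
      cases h : pvLoopB ((formula.map pvCanon).length + 2 ^ formula.flatten.length + 1)
          (formula.map pvCanon) (PySem.Set.ofList (formula.map pvCanon)) 0 with
      | true => rfl
      | false => exact absurd (hB.1 h) hbad
    rw [ha, hb]
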